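-- pv_equiv track=rewrite | github.com/charlesHetterich/Interpreter | interpreter.py | getPostSpace
-- ===== SOURCE A (Python) =====
-- def getPostSpace(s):
--     postSpace = False
--     cl = []
--     for c in s:
--         if postSpace:
--             cl.append(c)
--         elif c == " ":
--             postSpace = True
--     return cl
-- ===== SOURCE B (Python) =====
-- def getPostSpace(s):
--     i = s.find(" ")
--     if i == -1:
--         return []
--     return list(s[i + 1:])
-- ===== Notes on version B (the rewrite author's own statement) =====
-- stated objective: idiomatic
-- what changed: Replaces the flag-controlled per-character accumulation loop with locate-then-extract: find the index of the first space with str.find and slice everything after it into a list.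
import Mathlib
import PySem

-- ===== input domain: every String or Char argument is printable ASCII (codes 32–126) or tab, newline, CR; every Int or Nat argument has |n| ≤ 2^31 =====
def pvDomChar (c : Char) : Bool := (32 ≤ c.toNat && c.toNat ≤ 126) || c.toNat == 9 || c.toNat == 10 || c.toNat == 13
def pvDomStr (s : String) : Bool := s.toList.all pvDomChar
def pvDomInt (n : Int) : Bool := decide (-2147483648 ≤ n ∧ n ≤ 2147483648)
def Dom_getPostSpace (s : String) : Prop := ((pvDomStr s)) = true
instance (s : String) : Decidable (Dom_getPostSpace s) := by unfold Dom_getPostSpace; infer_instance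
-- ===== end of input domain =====

-- B replaces A's flag-controlled per-character accumulation loop with a locate-then-extract
-- decomposition: find the first space, slice everything after it (idiomatic; same cost).


-- ===== PORT A =====
-- A's loop: a postSpace flag and an accumulator list, one character at a time.
def pvGoA (ps : Bool) (cl : List String) : List Char → List String
  | [] => cl
  | c :: cs =>
    if ps then pvGoA ps (cl ++ [String.ofList [c]]) cs
    else if c = ' ' then pvGoA true cl cs
    else pvGoA ps cl cs

def getPostSpace (s : String) : List String := pvGoA false [] s.toList

-- ===== PORT B =====
-- i = s.find(" "); return [] if i == -1 else list(s[i+1:])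
def getPostSpace_alt (s : String) : List String :=
  let i := PySem.Str.find s " "
  if i = -1 then []
  else (PySem.List.slice s.toList (some (i + 1)) none).map (fun c => String.ofList [c])

-- ===== PRECONDITION & SPEC =====
def Spec_getPostSpace (s : String) (out : List String) : Prop := out = getPostSpace_alt s
instance (s : String) (out : List String) : Decidable (Spec_getPostSpace s out) := by unfold Spec_getPostSpace; infer_instance

-- ===== CLAIM (what is proved, stated in full; the proofs are below) =====
def Claim_equal_getPostSpace : Prop := ∀ (s : String), Dom_getPostSpace s → Spec_getPostSpace s (getPostSpace s)

-- ===== LEMMAS AND PROOFS =====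

-- once the flag is set, A copies every remaining character
lemma pvGoA_true (cl : List String) (cs : List Char) :
    pvGoA true cl cs = cl ++ cs.map (fun c => String.ofList [c]) := by
  induction cs generalizing cl with
  | nil => simp [pvGoA]
  | cons c t ih => simp [pvGoA, ih]

-- the search offset of find.go only shifts the result
lemma pvGo_shift (t : List Char) (k : Nat) :
    PySem.Chars.find.go [' '] t k =
      if PySem.Chars.find.go [' '] t 0 = -1 then -1 else PySem.Chars.find.go [' '] t 0 + k := by
  induction t generalizing k with
  | nil => simp [PySem.Chars.find.go]
  | cons c t ih =>
    by_cases h : List.isPrefixOf [' '] (c :: t)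
    · simp [PySem.Chars.find.go, h]
    · have hle : -1 ≤ PySem.Chars.find.go [' '] t 0 := PySem.Chars.neg_one_le_find t [' ']
      simp only [PySem.Chars.find.go, h]
      rw [ih (k + 1), ih 1]
      split_ifs with h1 <;> omega

-- unfolding one character of the space search
lemma pvFind_cons (c : Char) (t : List Char) :
    PySem.Chars.find (c :: t) [' '] =
      if c = ' ' then 0
      else if PySem.Chars.find t [' '] = -1 then -1 else PySem.Chars.find t [' '] + 1 := by
  have hpre : List.isPrefixOf [' '] (c :: t) = (c = ' ' : Bool) := by
    by_cases hc : c = ' '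
    · subst hc; simp [List.isPrefixOf]
    · simp [List.isPrefixOf, hc, Ne.symm hc]
  by_cases h : c = ' '
  · simp [PySem.Chars.find, PySem.Chars.find.go, hpre, h]
  · simp only [PySem.Chars.find, PySem.Chars.find.go, hpre, h]
    simpa using pvGo_shift t 1

-- the core equivalence, on the character list
lemma pvMain (cs : List Char) :
    pvGoA false [] cs =
      (if PySem.Chars.find cs [' '] = -1 then []
       else (PySem.List.slice cs (some (PySem.Chars.find cs [' '] + 1)) none).map
              (fun c => String.ofList [c])) := by
  induction cs with
  | nil => simp [pvGoA, PySem.Chars.find, PySem.Chars.find.go]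
  | cons c t ih =>
    by_cases h : c = ' '
    · subst h
      rw [show pvGoA false [] (' ' :: t) = pvGoA true [] t from by simp [pvGoA],
        pvGoA_true]
      have h0 : PySem.Chars.find (' ' :: t) [' '] = 0 := by rw [pvFind_cons]; simp
      rw [h0]
      simp only [if_neg (by norm_num : ((0:Int)) ≠ -1)]
      rw [show ((0 : Int) + 1) = ((1 : Nat) : Int) from rfl, PySem.List.slice_from_natCast]
      simp [List.drop]
    · rw [show pvGoA false [] (c :: t) = pvGoA false [] t from by simp [pvGoA, h], ih,
        pvFind_cons]
      by_cases hf : PySem.Chars.find t [' '] = -1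
      · simp [h, hf]
      · have hle : -1 ≤ PySem.Chars.find t [' '] := PySem.Chars.neg_one_le_find t [' ']
        obtain ⟨n, hn⟩ : ∃ n : Nat, PySem.Chars.find t [' '] = (n : Int) :=
          ⟨(PySem.Chars.find t [' ']).toNat, (Int.toNat_of_nonneg (by omega)).symm⟩
        have h1 : ((n : Int)) ≠ -1 := by omega
        have h2 : ((n : Int) + 1) ≠ -1 := by omega
        simp only [h, if_false, hn, if_neg h1, if_neg h2]
        rw [show ((n : Int) + 1) = ((n + 1 : Nat) : Int) from by push_cast; ring,
          show ((n + 1 : Nat) : Int) + 1 = ((n + 2 : Nat) : Int) from by push_cast; ring,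
          PySem.List.slice_from_natCast, PySem.List.slice_from_natCast]
        simp [List.drop]

-- ===== VERDICT (by name: the statement is the Claim_ definition above) =====
theorem getPostSpace_spec : Claim_equal_getPostSpace := by
  intro s _
  show getPostSpace s = getPostSpace_alt s
  unfold getPostSpace getPostSpace_alt
  simpa using pvMain s.toList
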